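-- pv_equiv track=rewrite | github.com/rin2401/r3jam | codejam/2020/1A/pattern_matching/sol.py | solve
-- ===== SOURCE A (Python) =====
-- def solve(a):
--     a = [x.split("*") for x in a]
--     b = sorted([x[0] for x in a], key=lambda x: len(x), reverse=True)
--     e = sorted([x[-1] for x in a], key=lambda x: len(x), reverse=True)
--
--     n = max([len(x) for x in a])
--
--     for x in b[1:]:
--         if len(x) !=0 and b[0][:len(x)] != x:
--             return "*"
--     for x in e[1:]:
--         if len(x) !=0 and e[0][-len(x):] != x:
--             return "*"
--     mid = ""
--     for x in a:
--         mid += "".join(x[1:-1])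
--
--     return b[0] + mid + e[0]
-- ===== SOURCE B (Python) =====
-- def solve(a):
--     parts = [x.split("*") for x in a]
--     pre = parts[0][0]
--     for p in parts[1:]:
--         q = p[0]
--         if q.startswith(pre):
--             pre = q
--         elif not pre.startswith(q):
--             return "*"
--     suf = parts[0][-1]
--     for p in parts[1:]:
--         q = p[-1]
--         if q.endswith(suf):
--             suf = q
--         elif not suf.endswith(q):
--             return "*"
--     mid = "".join(s for p in parts for s in p[1:-1])
--     return pre + mid + suf
-- ===== Notes on version B (the rewrite author's own statement) =====
-- stated objective: faster
-- what changed: Instead of sorting all prefixes/suffixes by length descending and verifying every one against the sorted head, B makes one fold over the patterns keeping a running merged prefix (resp. suffix), keeping the longer of two compatible pieces and failing immediately on an incompatible pair; the dead max([]) line is dropped.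
-- outside the precondition, e.g. on solve([]): A raises ValueError, B raises IndexError
import Mathlib
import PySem

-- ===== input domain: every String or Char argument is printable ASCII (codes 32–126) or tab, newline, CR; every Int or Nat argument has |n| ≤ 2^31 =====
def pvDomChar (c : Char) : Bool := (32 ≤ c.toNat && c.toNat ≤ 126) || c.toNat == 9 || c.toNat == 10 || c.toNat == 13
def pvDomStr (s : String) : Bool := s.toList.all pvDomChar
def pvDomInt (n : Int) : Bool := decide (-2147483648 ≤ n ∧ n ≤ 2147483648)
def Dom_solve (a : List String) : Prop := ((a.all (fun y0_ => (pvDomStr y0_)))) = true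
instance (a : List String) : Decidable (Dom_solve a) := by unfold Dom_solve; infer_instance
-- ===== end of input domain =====

-- B replaces A's sort-the-prefixes/suffixes-then-verify-against-the-longest decomposition by a single
-- fold that merges a running prefix (resp. suffix), keeping the longer of two compatible ones.

-- ===== PORT A =====
def solve (a : List String) : String :=
  let parts := a.map (fun x => PySem.Chars.splitOn x.toList ['*'])
  let b := PySem.List.sorted (parts.map (fun x => PySem.List.pyGetD x 0 [])) (fun x => x.length) true
  let e := PySem.List.sorted (parts.map (fun x => PySem.List.pyGetD x (-1) [])) (fun x => x.length) true
  match PySem.List.max? (parts.map (fun x => x.length)) (fun n => n) with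
  | none => ""   -- n = max([…]): on a = [] Python raises ValueError here; excluded by Pre_solve
  | some _ =>
    let b0 := PySem.List.pyGetD b 0 []
    let e0 := PySem.List.pyGetD e 0 []
    if (PySem.List.slice b (some 1) none).any
        (fun x => x.length != 0 && (PySem.List.slice b0 none (some (x.length : Int)) != x)) then "*"
    else if (PySem.List.slice e (some 1) none).any
        (fun x => x.length != 0 && (PySem.List.slice e0 (some (-(x.length : Int))) none != x)) then "*"
    else
      let mid := parts.foldl
        (fun acc x => acc ++ PySem.Chars.join [] (PySem.List.slice x (some 1) (some (-1)))) []
      String.ofList (b0 ++ mid ++ e0)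

-- ===== PORT B =====
-- merge step of Source B's loops: keep the longer of two compatible pieces, fail (None) otherwise
def mergeBy (cmp : List Char → List Char → Bool) (acc : Option (List Char)) (q : List Char) :
    Option (List Char) :=
  match acc with
  | none => none
  | some cur => if cmp q cur then some q else if cmp cur q then some cur else none

def solve_alt (a : List String) : String :=
  let parts := a.map (fun x => PySem.Chars.splitOn x.toList ['*'])
  match parts with
  | [] => ""   -- parts[0]: on a = [] Python raises IndexError here; excluded by Pre_solve
  | p0 :: rest =>
    match rest.foldl (fun acc p => mergeBy PySem.Chars.startswith acc (PySem.List.pyGetD p 0 []))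
        (some (PySem.List.pyGetD p0 0 [])) with
    | none => "*"
    | some pre =>
      match rest.foldl (fun acc p => mergeBy PySem.Chars.endswith acc (PySem.List.pyGetD p (-1) []))
          (some (PySem.List.pyGetD p0 (-1) [])) with
      | none => "*"
      | some suf =>
        let mid := PySem.Chars.join []
          (parts.flatMap (fun p => PySem.List.slice p (some 1) (some (-1))))
        String.ofList (pre ++ mid ++ suf)

-- ===== PRECONDITION & SPEC =====
-- Pre_ excludes only the empty list, on which A raises ValueError (max([])) and B raises IndexError.
def Pre_solve (a : List String) : Prop := a ≠ []
instance (a : List String) : Decidable (Pre_solve a) := by unfold Pre_solve; infer_instance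
def pvWitness_solve : List String := ["ab*c", "a*de*c"]
def Spec_solve (a : List String) (out : String) : Prop := out = solve_alt a
instance (a : List String) (out : String) : Decidable (Spec_solve a out) := by unfold Spec_solve; infer_instance

-- ===== CLAIM (what is proved, stated in full; the proofs are below) =====
def Claim_equal_solve : Prop := ∀ (a : List String), Dom_solve a → Pre_solve a → Spec_solve a (solve a)

-- ===== LEMMAS AND PROOFS =====

theorem mergeBy_some (cmp : List Char → List Char → Bool) (cur q : List Char) :
    mergeBy cmp (some cur) q = if cmp q cur then some q else if cmp cur q then some cur
      else none := rfl

theorem foldl_mergeBy_none (cmp : List Char → List Char → Bool) (g : List (List Char) → List Char)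
    (l : List (List (List Char))) :
    l.foldl (fun acc p => mergeBy cmp acc (g p)) none = none := by
  induction l with
  | nil => rfl
  | cons h t ih => simpa [mergeBy] using ih

-- soundness of the merging fold: a successful merge is an R-upper bound drawn from the inputs
theorem foldl_mergeBy_sound (cmp : List Char → List Char → Bool)
    (R : List Char → List Char → Prop)
    (hc : ∀ s p, cmp s p = true ↔ R p s)
    (hrefl : ∀ x, R x x) (htrans : ∀ x y z, R x y → R y z → R x z)
    (g : List (List Char) → List Char) :
    ∀ (l : List (List (List Char))) (h m : List Char),
      l.foldl (fun acc p => mergeBy cmp acc (g p)) (some h) = some m →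
      R h m ∧ m ∈ h :: l.map g ∧ ∀ p ∈ l, R (g p) m := by
  intro l
  induction l with
  | nil => intro h m hm; cases hm; exact ⟨hrefl _, by simp, by simp⟩
  | cons q t ih =>
    intro h m hm
    rw [List.foldl_cons, mergeBy_some] at hm
    by_cases h1 : cmp (g q) h = true
    · rw [if_pos h1] at hm
      obtain ⟨hq, hmem, hall⟩ := ih (g q) m hm
      refine ⟨htrans _ _ _ ((hc _ _).mp h1) hq, ?_, ?_⟩
      · rcases List.mem_cons.mp hmem with h' | h' <;> simp [h']
      · intro p hp
        rcases List.mem_cons.mp hp with h' | h'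
        · subst h'; exact hq
        · exact hall p h'
    · rw [if_neg h1] at hm
      by_cases h2 : cmp h (g q) = true
      · rw [if_pos h2] at hm
        obtain ⟨hq, hmem, hall⟩ := ih h m hm
        refine ⟨hq, ?_, ?_⟩
        · rcases List.mem_cons.mp hmem with h' | h' <;> simp [h']
        · intro p hp
          rcases List.mem_cons.mp hp with h' | h'
          · subst h'; exact htrans _ _ _ ((hc _ _).mp h2) hq
          · exact hall p h'
      · rw [if_neg h2] at hm
        rw [foldl_mergeBy_none] at hm
        cases hm

-- completeness: if everything is R-below a common M the fold never fails
theorem foldl_mergeBy_complete (cmp : List Char → List Char → Bool)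
    (R : List Char → List Char → Prop)
    (hc : ∀ s p, cmp s p = true ↔ R p s)
    (hcomp : ∀ x y M, R x M → R y M → x.length ≤ y.length → R x y)
    (g : List (List Char) → List Char) (M : List Char) :
    ∀ (l : List (List (List Char))) (h : List Char),
      R h M → (∀ p ∈ l, R (g p) M) →
      ∃ m, l.foldl (fun acc p => mergeBy cmp acc (g p)) (some h) = some m := by
  intro l
  induction l with
  | nil => intro h _ _; exact ⟨h, rfl⟩
  | cons q t ih =>
    intro h hh hall
    have hq : R (g q) M := hall q (by simp)
    rw [List.foldl_cons, mergeBy_some]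
    by_cases h1 : cmp (g q) h = true
    · rw [if_pos h1]; exact ih (g q) hq (fun p hp => hall p (by simp [hp]))
    · rw [if_neg h1]
      have h2 : cmp h (g q) = true := by
        rcases Nat.le_total h.length (g q).length with hle | hle
        · exact absurd ((hc _ _).mpr (hcomp h (g q) M hh hq hle)) h1
        · exact (hc _ _).mpr (hcomp (g q) h M hq hh hle)
      rw [if_pos h2]
      exact ih h hh (fun p hp => hall p (by simp [hp]))

-- the core: against a maximum-length element b0 of h :: l.map g, the fold returns some b0 iff
-- every element is R-below b0, and none otherwise
theorem foldl_mergeBy_core (cmp : List Char → List Char → Bool)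
    (R : List Char → List Char → Prop)
    (hc : ∀ s p, cmp s p = true ↔ R p s)
    (hrefl : ∀ x, R x x) (htrans : ∀ x y z, R x y → R y z → R x z)
    (heq : ∀ x y, R x y → y.length ≤ x.length → x = y)
    (hcomp : ∀ x y M, R x M → R y M → x.length ≤ y.length → R x y)
    (g : List (List Char) → List Char) (l : List (List (List Char))) (h b0 : List Char)
    (hb0mem : b0 ∈ h :: l.map g)
    (hb0max : ∀ x ∈ h :: l.map g, x.length ≤ b0.length) :
    ((∀ x ∈ h :: l.map g, R x b0) →
        l.foldl (fun acc p => mergeBy cmp acc (g p)) (some h) = some b0) ∧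
    ((¬ ∀ x ∈ h :: l.map g, R x b0) →
        l.foldl (fun acc p => mergeBy cmp acc (g p)) (some h) = none) := by
  constructor
  · intro hall
    obtain ⟨m, hm⟩ := foldl_mergeBy_complete cmp R hc hcomp g b0 l h
      (hall h (by simp)) (fun p hp => hall (g p) (by simp; exact .inr ⟨p, hp, rfl⟩))
    obtain ⟨hhm, hmmem, hallm⟩ := foldl_mergeBy_sound cmp R hc hrefl htrans g l h m hm
    have hb0m : R b0 m := by
      rcases List.mem_cons.mp hb0mem with h' | h'
      · subst h'; exact hhm
      · obtain ⟨p, hp, hgp⟩ := List.mem_map.mp h'; subst hgp; exact hallm p hp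
    have : b0 = m := heq b0 m hb0m (hb0max m hmmem)
    rw [hm, this]
  · intro hnall
    cases hf : l.foldl (fun acc p => mergeBy cmp acc (g p)) (some h) with
    | none => rfl
    | some m =>
      exfalso
      obtain ⟨hhm, hmmem, hallm⟩ := foldl_mergeBy_sound cmp R hc hrefl htrans g l h m hf
      have hb0m : R b0 m := by
        rcases List.mem_cons.mp hb0mem with h' | h'
        · subst h'; exact hhm
        · obtain ⟨p, hp, hgp⟩ := List.mem_map.mp h'; subst hgp; exact hallm p hp
      have hm0 : b0 = m := heq b0 m hb0m (hb0max m hmmem)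
      subst hm0
      refine hnall ?_
      intro x hx
      rcases List.mem_cons.mp hx with h' | h'
      · subst h'; exact hhm
      · obtain ⟨p, hp, hgp⟩ := List.mem_map.mp h'; subst hgp; exact hallm p hp

-- A's prefix-loop predicate is false exactly on prefixes of b0
theorem predPre_false_iff (b0 x : List Char) :
    ((x.length != 0 && (PySem.List.slice b0 none (some (x.length : Int)) != x)) = false)
      ↔ x <+: b0 := by
  cases x with
  | nil => simp
  | cons c cs =>
    rw [PySem.List.slice_to_natCast]
    simp only [List.length_cons, Bool.and_eq_false_iff]
    rw [List.prefix_iff_eq_take]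
    constructor <;> (intro h; simp_all)

-- A's suffix-loop predicate is false exactly on suffixes of e0
theorem predSuf_false_iff (e0 x : List Char) :
    ((x.length != 0 && (PySem.List.slice e0 (some (-(x.length : Int))) none != x)) = false)
      ↔ x <:+ e0 := by
  cases x with
  | nil => simp
  | cons c cs =>
    rw [PySem.List.slice_from_neg_natCast _ _ (by simp)]
    simp only [List.length_cons, Bool.and_eq_false_iff]
    rw [List.suffix_iff_eq_drop]
    constructor <;> (intro h; simp_all)

theorem join_nil_eq_flatten (ls : List (List Char)) : PySem.Chars.join [] ls = ls.flatten := by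
  show List.intercalate [] ls = ls.flatten
  induction ls with
  | nil => rfl
  | cons h t ih => cases t <;> simp_all [List.intercalate, List.intersperse]

theorem flatten_flatMap {α β : Type} (l : List α) (g : α → List (List β)) :
    (l.flatMap g).flatten = l.flatMap (fun x => (g x).flatten) := by
  induction l with
  | nil => rfl
  | cons h t ih => simp_all

-- one side of A (sort desc by length, check everything against the head) agrees with one fold of B
theorem side_agree (cmp : List Char → List Char → Bool) (R : List Char → List Char → Prop)
    (hc : ∀ s p, cmp s p = true ↔ R p s)
    (hrefl : ∀ x, R x x) (htrans : ∀ x y z, R x y → R y z → R x z)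
    (heq : ∀ x y, R x y → y.length ≤ x.length → x = y)
    (hcomp : ∀ x y M, R x M → R y M → x.length ≤ y.length → R x y)
    (pred : List Char → List Char → Bool)
    (hpred : ∀ b0 x, pred b0 x = false ↔ R x b0)
    (g : List (List Char) → List Char) (p0 : List (List Char)) (rest : List (List (List Char)))
    (b0 : List Char) (bt : List (List Char))
    (hsort : PySem.List.sorted ((p0 :: rest).map (fun x => g x)) (fun x => x.length) true
      = b0 :: bt) :
    (bt.any (pred b0) = false →
      rest.foldl (fun acc p => mergeBy cmp acc (g p)) (some (g p0)) = some b0) ∧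
    (bt.any (pred b0) = true →
      rest.foldl (fun acc p => mergeBy cmp acc (g p)) (some (g p0)) = none) := by
  have hperm : (b0 :: bt).Perm ((p0 :: rest).map (fun x => g x)) := by
    rw [← hsort]; exact PySem.List.sorted_perm _ _ _
  have hmemiff : ∀ x, x ∈ b0 :: bt ↔ x ∈ g p0 :: rest.map g := by
    intro x; rw [hperm.mem_iff]; simp
  have hpair : List.Pairwise (fun a b : List Char => b.length ≤ a.length) (b0 :: bt) := by
    rw [← hsort]; exact PySem.List.sorted_pairwise_rev _ _
  have hb0max : ∀ x ∈ g p0 :: rest.map g, x.length ≤ b0.length := by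
    intro x hx
    rcases List.mem_cons.mp ((hmemiff x).mpr hx) with h' | h'
    · simp [h']
    · exact (List.pairwise_cons.mp hpair).1 x h'
  have hb0mem : b0 ∈ g p0 :: rest.map g := (hmemiff b0).mp (by simp)
  have hcore := foldl_mergeBy_core cmp R hc hrefl htrans heq hcomp g rest (g p0) b0
    hb0mem hb0max
  constructor
  · intro hany
    refine hcore.1 ?_
    intro x hx
    rcases List.mem_cons.mp ((hmemiff x).mpr hx) with h' | h'
    · subst h'; exact hrefl _
    · have : pred b0 x = false := by
        rw [List.any_eq_false] at hany; simpa using hany x h'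
      exact (hpred b0 x).mp this
  · intro hany
    refine hcore.2 ?_
    intro hall
    rw [List.any_eq_true] at hany
    obtain ⟨x, hx, hpx⟩ := hany
    have hxR : R x b0 := hall x ((hmemiff x).mp (by simp [hx]))
    rw [← hpred b0 x] at hxR
    simp [hxR] at hpx

-- ===== VERDICT (by name: the statement is the Claim_ definition above) =====
theorem solve_spec : Claim_equal_solve := by
  intro a _ hpre
  unfold Spec_solve solve solve_alt
  cases a with
  | nil => exact absurd rfl hpre
  | cons s ss =>
    simp only [List.map_cons]
    generalize PySem.Chars.splitOn s.toList ['*'] = p0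
    generalize List.map (fun x => PySem.Chars.splitOn x.toList ['*']) ss = rest
    obtain ⟨v, hm⟩ : ∃ v, PySem.List.max? (p0.length :: List.map (fun x => x.length) rest)
        (fun n => n) = some v := by
      cases hx : PySem.List.max? (p0.length :: List.map (fun x => x.length) rest) (fun n => n) with
      | none => rw [PySem.List.max?_eq_none_iff] at hx; cases hx
      | some v => exact ⟨v, rfl⟩
    obtain ⟨b0, bt, hb⟩ : ∃ b0 bt, PySem.List.sorted
        (PySem.List.pyGetD p0 0 [] :: List.map (fun x => PySem.List.pyGetD x 0 []) rest)
        (fun x => x.length) true = b0 :: bt := by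
      cases hx : PySem.List.sorted
          (PySem.List.pyGetD p0 0 [] :: List.map (fun x => PySem.List.pyGetD x 0 []) rest)
          (fun x => x.length) true with
      | nil => rw [PySem.List.sorted_eq_nil_iff] at hx; cases hx
      | cons b0 bt => exact ⟨b0, bt, rfl⟩
    obtain ⟨e0, et, he⟩ : ∃ e0 et, PySem.List.sorted
        (PySem.List.pyGetD p0 (-1) [] :: List.map (fun x => PySem.List.pyGetD x (-1) []) rest)
        (fun x => x.length) true = e0 :: et := by
      cases hx : PySem.List.sorted
          (PySem.List.pyGetD p0 (-1) [] :: List.map (fun x => PySem.List.pyGetD x (-1) []) rest)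
          (fun x => x.length) true with
      | nil => rw [PySem.List.sorted_eq_nil_iff] at hx; cases hx
      | cons e0 et => exact ⟨e0, et, rfl⟩
    rw [hm, hb, he]
    have hgb : PySem.List.pyGetD (b0 :: bt) 0 ([] : List Char) = b0 := by simp [pysem]
    have hge : PySem.List.pyGetD (e0 :: et) 0 ([] : List Char) = e0 := by simp [pysem]
    have hslb : PySem.List.slice (b0 :: bt) (some 1) none = bt := by
      simp [PySem.List.slice_from_one]
    have hsle : PySem.List.slice (e0 :: et) (some 1) none = et := by
      simp [PySem.List.slice_from_one]
    rw [hgb, hge, hslb, hsle]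
    have hpre := side_agree PySem.Chars.startswith (fun x y => x <+: y)
      PySem.Chars.startswith_iff List.prefix_refl (fun _ _ _ h1 h2 => h1.trans h2)
      (fun _ _ h hle => h.eq_of_length_le hle)
      (fun _ _ _ hx hy hl => List.prefix_of_prefix_length_le hx hy hl)
      (fun b0 x => x.length != 0 && (PySem.List.slice b0 none (some (x.length : Int)) != x))
      predPre_false_iff (fun x => PySem.List.pyGetD x 0 []) p0 rest b0 bt hb
    have hsuf := side_agree PySem.Chars.endswith (fun x y => x <:+ y)
      PySem.Chars.endswith_iff List.suffix_refl (fun _ _ _ h1 h2 => h1.trans h2)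
      (fun _ _ h hle => h.eq_of_length_le hle)
      (fun _ _ _ hx hy hl => List.suffix_of_suffix_length_le hx hy hl)
      (fun e0 x => x.length != 0 && (PySem.List.slice e0 (some (-(x.length : Int))) none != x))
      predSuf_false_iff (fun x => PySem.List.pyGetD x (-1) []) p0 rest e0 et he
    beta_reduce at hpre hsuf
    cases hA1 : bt.any
        (fun x => x.length != 0 && (PySem.List.slice b0 none (some (x.length : Int)) != x)) with
    | true =>
      rw [hpre.2 hA1]
      simp
    | false =>
      rw [hpre.1 hA1]
      cases hA2 : et.any
          (fun x => x.length != 0 && (PySem.List.slice e0 (some (-(x.length : Int))) none != x)) with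
      | true =>
        rw [hsuf.2 hA2]
        simp
      | false =>
        rw [hsuf.1 hA2]
        simp only [Bool.false_eq_true, if_false]
        congr 1
        rw [PySem.List.foldl_append_eq_flatMap
          (g := fun x => PySem.Chars.join [] (PySem.List.slice x (some 1) (some (-1))))]
        rw [join_nil_eq_flatten, flatten_flatMap]
        simp [join_nil_eq_flatten]
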